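-- pv_equiv track=rewrite | github.com/qtong0/LeetcodePythonProject | solutions/leetcode_1001_1050/LeetCode1001_GridIllumination.py | gridIllumination
-- ===== SOURCE A (Python) =====
-- from typing import List
--
-- def gridIllumination(n: int, lamps: List[List[int]], queries: List[List[int]]) -> List[int]:
--     dirs = [[0, 1], [0, -1], [1, 0], [-1, 0], [1, 1], [1, -1], [-1, 1], [-1, -1], [0, 0]]
--
--     # d1, d2: row, col number to count of lamp
--     # d3, d4: diagonal x-y, x+y count of lamp
--     # d5: count of lamps for location n * x + y
--     d1, d2, d3, d4, d5 = {}, {}, {}, {}, {}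
--     for x, y in lamps:
--         d1[x] = d1.get(x, 0) + 1
--         d2[y] = d2.get(y, 0) + 1
--         d3[x-y] = d3.get(x-y, 0) + 1
--         d4[x+y] = d4.get(x+y, 0) + 1
--         d5[n * x + y] = d5.get(n * x + y, 0) + 1
--
--     ans = [0] * len(queries)
--     for i, (x, y) in enumerate(queries):
--         ans[i] = 1 if (d1.get(x, 0) > 0 or d2.get(y, 0) > 0 or d3.get(x-y, 0) > 0 or d4.get(x+y, 0) > 0) else 0
--         for d in dirs:
--             x1, y1 = x + d[0], y + d[1]
--             if 0 <= x1 < n and 0 <= y1 < n and n * x1 + y1 in d5: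
--                 # turn off the light, decrement the counts
--                 times = d5.get(n * x1 + y1)
--                 d1[x1] = d1.get(x1, 1) - times
--                 d2[y1] = d2.get(y1, 1) - times
--                 d3[x1 - y1] = d3.get(x1 - y1, 1) - times
--                 d4[x1 + y1] = d4.get(x1 + y1, 1) - times
--                 del d5[n * x1 + y1]
--     return ans
-- ===== SOURCE B (Python) =====
-- from typing import List
--
-- def gridIllumination(n: int, lamps: List[List[int]], queries: List[List[int]]) -> List[int]:
--     # One dict of active lamp cells (key n*x+y -> how many lamps sit there) plus a log of
--     # switched-off cells; each query is answered by scanning the lamp list and the off-log.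
--     active = {}
--     for x, y in lamps:
--         k = n * x + y
--         active[k] = active.get(k, 0) + 1
--     removed = []  # (row, col, times) of cells switched off so far
--     ans = []
--     for x, y in queries:
--         def bal(proj, target):
--             have = sum(1 for a, b in lamps if proj(a, b) == target)
--             gone = sum(t for a, b, t in removed if proj(a, b) == target)
--             return have - gone
--         lit = (bal(lambda a, b: a, x) > 0 or bal(lambda a, b: b, y) > 0
--                or bal(lambda a, b: a - b, x - y) > 0 or bal(lambda a, b: a + b, x + y) > 0)
--         ans.append(1 if lit else 0)
--         for dx, dy in ((0, 1), (0, -1), (1, 0), (-1, 0), (1, 1), (1, -1), (-1, 1), (-1, -1), (0, 0)):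
--             x1, y1 = x + dx, y + dy
--             if 0 <= x1 < n and 0 <= y1 < n:
--                 t = active.pop(n * x1 + y1, None)
--                 if t is not None:
--                     removed.append((x1, y1, t))
--     return ans
-- ===== Notes on version B (the rewrite author's own statement) =====
-- stated objective: alternative
-- what changed: A precomputes five count dictionaries (row, column, two diagonals, cell) and updates them on every switch-off; B keeps only one dict of active lamp cells plus a log of switched-off cells and answers each query by scanning the lamp list and that log.
import Mathlib
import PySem

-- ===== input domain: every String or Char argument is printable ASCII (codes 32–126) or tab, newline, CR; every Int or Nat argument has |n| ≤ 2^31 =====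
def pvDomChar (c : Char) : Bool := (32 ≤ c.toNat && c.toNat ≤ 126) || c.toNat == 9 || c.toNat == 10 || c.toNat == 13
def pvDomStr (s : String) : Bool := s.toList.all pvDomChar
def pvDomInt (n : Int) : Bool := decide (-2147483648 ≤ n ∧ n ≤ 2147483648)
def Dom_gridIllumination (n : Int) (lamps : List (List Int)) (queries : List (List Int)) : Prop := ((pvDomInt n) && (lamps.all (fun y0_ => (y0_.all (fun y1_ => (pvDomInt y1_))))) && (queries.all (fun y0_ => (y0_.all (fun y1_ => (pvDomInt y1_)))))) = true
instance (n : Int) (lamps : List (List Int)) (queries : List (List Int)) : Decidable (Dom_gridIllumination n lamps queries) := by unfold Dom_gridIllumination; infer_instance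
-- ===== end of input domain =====

-- B replaces A's five count dictionaries by one active-cell dict plus a switched-off log,
-- answering each query by scanning the lamp list and the log (objective: alternative, not faster).

-- ===== PORT A =====
-- 'for x, y in l' unpacking of a two-element row (Pre_ guarantees length 2; junk (0,0) otherwise)
def pvPair (l : List Int) : Int × Int := match l with | [x, y] => (x, y) | _ => (0, 0)

structure pvASt where
  d1 : PySem.Dict Int Int
  d2 : PySem.Dict Int Int
  d3 : PySem.Dict Int Int
  d4 : PySem.Dict Int Int
  d5 : PySem.Dict Int Int

def pvDirsA : List (List Int) := [[0,1],[0,-1],[1,0],[-1,0],[1,1],[1,-1],[-1,1],[-1,-1],[0,0]]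

-- one iteration of A's lamp loop: d[k] = d.get(k, 0) + 1 on the five dicts
def pvBuildStep (n : Int) (s : pvASt) (l : List Int) : pvASt :=
  let x := (pvPair l).1
  let y := (pvPair l).2
  { d1 := s.d1.insert x (s.d1.getD x 0 + 1),
    d2 := s.d2.insert y (s.d2.getD y 0 + 1),
    d3 := s.d3.insert (x - y) (s.d3.getD (x - y) 0 + 1),
    d4 := s.d4.insert (x + y) (s.d4.getD (x + y) 0 + 1),
    d5 := s.d5.insert (n * x + y) (s.d5.getD (n * x + y) 0 + 1) }

-- one iteration of A's inner 'for d in dirs' loop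
-- (times = d5.get(k) is ported as getD k 0: the guard guarantees the key is present)
def pvADir (n x y : Int) (s : pvASt) (d : List Int) : pvASt :=
  let x1 := x + (pvPair d).1
  let y1 := y + (pvPair d).2
  if 0 ≤ x1 ∧ x1 < n ∧ 0 ≤ y1 ∧ y1 < n ∧ s.d5.contains (n * x1 + y1) = true then
    let times := s.d5.getD (n * x1 + y1) 0
    { d1 := s.d1.insert x1 (s.d1.getD x1 1 - times),
      d2 := s.d2.insert y1 (s.d2.getD y1 1 - times),
      d3 := s.d3.insert (x1 - y1) (s.d3.getD (x1 - y1) 1 - times),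
      d4 := s.d4.insert (x1 + y1) (s.d4.getD (x1 + y1) 1 - times),
      d5 := s.d5.erase (n * x1 + y1) }
  else s

-- one iteration of A's query loop ('ans[i] = …' becomes appending in index order)
def pvAQuery (n : Int) (st : pvASt × List Int) (q : List Int) : pvASt × List Int :=
  let x := (pvPair q).1
  let y := (pvPair q).2
  let s := st.1
  let lit : Int := if s.d1.getD x 0 > 0 ∨ s.d2.getD y 0 > 0 ∨ s.d3.getD (x - y) 0 > 0 ∨ s.d4.getD (x + y) 0 > 0 then 1 else 0
  (pvDirsA.foldl (pvADir n x y) s, st.2 ++ [lit])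

def gridIllumination (n : Int) (lamps : List (List Int)) (queries : List (List Int)) : List Int :=
  let s0 : pvASt := ⟨PySem.Dict.empty, PySem.Dict.empty, PySem.Dict.empty, PySem.Dict.empty, PySem.Dict.empty⟩
  let s1 := lamps.foldl (pvBuildStep n) s0
  (queries.foldl (pvAQuery n) (s1, [])).2

-- ===== PORT B =====
def pvDirsB : List (Int × Int) := [(0,1),(0,-1),(1,0),(-1,0),(1,1),(1,-1),(-1,1),(-1,-1),(0,0)]

-- sum(1 for a, b in lamps if proj(a, b) == target)
def pvCnt (π : Int → Int → Int) (lamps : List (List Int)) (t : Int) : Int :=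
  lamps.foldl (fun s l => if π (pvPair l).1 (pvPair l).2 = t then s + 1 else s) 0

-- sum(t for a, b, t in removed if proj(a, b) == target)
def pvGone (π : Int → Int → Int) (removed : List (Int × Int × Int)) (t : Int) : Int :=
  removed.foldl (fun s r => if π r.1 r.2.1 = t then s + r.2.2 else s) 0

-- bal(proj, target) = have - gone
def pvBal (π : Int → Int → Int) (lamps : List (List Int)) (removed : List (Int × Int × Int)) (t : Int) : Int :=
  pvCnt π lamps t - pvGone π removed t

-- one iteration of B's neighbour loop: active.pop(k, None)
def pvBDir (n x y : Int) (st : PySem.Dict Int Int × List (Int × Int × Int)) (d : Int × Int) :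
    PySem.Dict Int Int × List (Int × Int × Int) :=
  let x1 := x + d.1
  let y1 := y + d.2
  if 0 ≤ x1 ∧ x1 < n ∧ 0 ≤ y1 ∧ y1 < n then
    match st.1.pop? (n * x1 + y1) with
    | some (t, act') => (act', st.2 ++ [(x1, y1, t)])
    | none => st
  else st

-- one iteration of B's query loop
def pvBQuery (n : Int) (lamps : List (List Int))
    (st : PySem.Dict Int Int × List (Int × Int × Int) × List Int) (q : List Int) :
    PySem.Dict Int Int × List (Int × Int × Int) × List Int :=
  let x := (pvPair q).1
  let y := (pvPair q).2
  let lit : Int := if pvBal (fun a _ => a) lamps st.2.1 x > 0 ∨ pvBal (fun _ b => b) lamps st.2.1 y > 0 ∨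
      pvBal (fun a b => a - b) lamps st.2.1 (x - y) > 0 ∨ pvBal (fun a b => a + b) lamps st.2.1 (x + y) > 0 then 1 else 0
  let p := pvDirsB.foldl (pvBDir n x y) (st.1, st.2.1)
  (p.1, p.2, st.2.2 ++ [lit])

def gridIllumination_alt (n : Int) (lamps : List (List Int)) (queries : List (List Int)) : List Int :=
  let active := lamps.foldl
    (fun a l => a.insert (n * (pvPair l).1 + (pvPair l).2) (a.getD (n * (pvPair l).1 + (pvPair l).2) 0 + 1))
    PySem.Dict.empty
  (queries.foldl (pvBQuery n lamps) (active, [], [])).2.2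

-- ===== PRECONDITION & SPEC =====
-- Pre_ excludes exactly the malformed rows on which Python's 'for x, y in …' unpacking raises ValueError.
def Pre_gridIllumination (n : Int) (lamps : List (List Int)) (queries : List (List Int)) : Prop :=
  (∀ l ∈ lamps, l.length = 2) ∧ (∀ q ∈ queries, q.length = 2)
instance (n : Int) (lamps : List (List Int)) (queries : List (List Int)) : Decidable (Pre_gridIllumination n lamps queries) := by unfold Pre_gridIllumination; infer_instance

def pvWitness_gridIllumination : Int × List (List Int) × List (List Int) := (2, [[0, 0], [1, 1]], [[1, 0], [1, 1]])

def Spec_gridIllumination (n : Int) (lamps : List (List Int)) (queries : List (List Int)) (out : List Int) : Prop := out = gridIllumination_alt n lamps queries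
instance (n : Int) (lamps : List (List Int)) (queries : List (List Int)) (out : List Int) : Decidable (Spec_gridIllumination n lamps queries out) := by unfold Spec_gridIllumination; infer_instance

-- ===== CLAIM (what is proved, stated in full; the proofs are below) =====
def Claim_equal_gridIllumination : Prop := ∀ (n : Int) (lamps : List (List Int)) (queries : List (List Int)), Dom_gridIllumination n lamps queries → Pre_gridIllumination n lamps queries → Spec_gridIllumination n lamps queries (gridIllumination n lamps queries)

-- ===== LEMMAS AND PROOFS =====

-- invariant of one of A's count dicts against B's books (lamp list minus switched-off log):
-- a missing key means nothing was ever counted there; a stored value equals the balance, or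
-- exceeds it by one while nonpositive (A's 'd.get(k, 1)' default after a d5 key collision)
def pvDInv (π : Int → Int → Int) (d : PySem.Dict Int Int) (lamps : List (List Int)) (removed : List (Int × Int × Int)) : Prop :=
  ∀ r : Int,
    (d.get? r = none → pvCnt π lamps r = 0 ∧ pvGone π removed r = 0) ∧
    (∀ f, d.get? r = some f → f = pvBal π lamps removed r ∨ (f = pvBal π lamps removed r + 1 ∧ f ≤ 0))

-- full simulation invariant between A's state and B's state
def pvInv (n : Int) (lamps : List (List Int)) (s : pvASt) (act : PySem.Dict Int Int) (removed : List (Int × Int × Int)) : Prop :=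
  s.d5 = act ∧
  (∀ k v, act.get? k = some v → 1 ≤ v) ∧
  pvDInv (fun a _ => a) s.d1 lamps removed ∧
  pvDInv (fun _ b => b) s.d2 lamps removed ∧
  pvDInv (fun a b => a - b) s.d3 lamps removed ∧
  pvDInv (fun a b => a + b) s.d4 lamps removed

-- generic one-dict counting build
def pvBuild1 (π : Int → Int → Int) (lamps : List (List Int)) (d : PySem.Dict Int Int) : PySem.Dict Int Int :=
  lamps.foldl (fun d l => d.insert (π (pvPair l).1 (pvPair l).2) (d.getD (π (pvPair l).1 (pvPair l).2) 0 + 1)) d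

theorem pvCnt_shift (π : Int → Int → Int) (lamps : List (List Int)) (r : Int) :
    ∀ a : Int, lamps.foldl (fun s l => if π (pvPair l).1 (pvPair l).2 = r then s + 1 else s) a = a + pvCnt π lamps r := by
  induction lamps with
  | nil => intro a; simp [pvCnt]
  | cons l ls ih =>
    intro a
    have h1 : pvCnt π (l :: ls) r = (if π (pvPair l).1 (pvPair l).2 = r then (0 : Int) + 1 else 0) + pvCnt π ls r := ih _
    rw [List.foldl_cons, ih, h1]
    by_cases hc : π (pvPair l).1 (pvPair l).2 = r <;> simp [hc] <;> omega

theorem pvGone_shift (π : Int → Int → Int) (removed : List (Int × Int × Int)) (r : Int) :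
    ∀ a : Int, removed.foldl (fun s p => if π p.1 p.2.1 = r then s + p.2.2 else s) a = a + pvGone π removed r := by
  induction removed with
  | nil => intro a; simp [pvGone]
  | cons p ps ih =>
    intro a
    have h1 : pvGone π (p :: ps) r = (if π p.1 p.2.1 = r then (0 : Int) + p.2.2 else 0) + pvGone π ps r := ih _
    rw [List.foldl_cons, ih, h1]
    by_cases hc : π p.1 p.2.1 = r <;> simp [hc] <;> omega

theorem pv_get?_erase (d : PySem.Dict Int Int) (k k' : Int) :
    (d.erase k).get? k' = if k' = k then none else d.get? k' := by
  obtain ⟨items⟩ := d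
  induction items with
  | nil =>
    simp only [PySem.Dict.erase, PySem.Dict.get?, List.filter_nil, List.find?_nil, Option.map_none]
    split <;> rfl
  | cons p rest ih =>
    simp only [PySem.Dict.erase, PySem.Dict.get?, List.filter_cons] at *
    by_cases hpk : p.1 = k
    · have hb : (p.1 == k) = true := by simp [hpk]
      rw [hb]
      simp only [Bool.not_true, if_neg (by simp : ¬(false = true))]
      by_cases hk' : k' = k
      · simpa [hk'] using ih
      · have h2 : (p.1 == k') = false := by simp [hpk, Ne.symm hk']
        rw [if_neg hk'] at ih ⊢
        rw [ih]
        simp [List.find?, h2]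
    · have hb : (p.1 == k) = false := by simp [hpk]
      rw [hb]
      simp only [Bool.not_false, if_pos rfl, List.find?_cons]
      by_cases hpk' : p.1 = k'
      · have h2 : (p.1 == k') = true := by simp [hpk']
        rw [h2]
        have hk'k : ¬ (k' = k) := by rw [← hpk'] at *; exact fun h => hpk h
        simp [List.find?, h2, hk'k]
      · have h2 : (p.1 == k') = false := by simp [hpk']
        rw [h2]
        simpa [List.find?, h2] using ih

theorem pvCnt_cons (π : Int → Int → Int) (l : List Int) (ls : List (List Int)) (r : Int) :
    pvCnt π (l :: ls) r = (if π (pvPair l).1 (pvPair l).2 = r then 1 else 0) + pvCnt π ls r := by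
  have h : pvCnt π (l :: ls) r = (if π (pvPair l).1 (pvPair l).2 = r then (0 : Int) + 1 else 0) + pvCnt π ls r :=
    pvCnt_shift π ls r _
  rw [h]
  by_cases hc : π (pvPair l).1 (pvPair l).2 = r <;> simp [hc]

theorem pvGone_append (π : Int → Int → Int) (removed : List (Int × Int × Int)) (x1 y1 t r : Int) :
    pvGone π (removed ++ [(x1, y1, t)]) r = pvGone π removed r + (if π x1 y1 = r then t else 0) := by
  have h : pvGone π (removed ++ [(x1, y1, t)]) r =
      (removed ++ [(x1, y1, t)]).foldl (fun s p => if π p.1 p.2.1 = r then s + p.2.2 else s) 0 := rfl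
  rw [h, List.foldl_append, pvGone_shift π [(x1, y1, t)] r _]
  have h2 : removed.foldl (fun s p => if π p.1 p.2.1 = r then s + p.2.2 else s) 0 = pvGone π removed r := rfl
  rw [h2]
  by_cases hc : π x1 y1 = r <;> simp [pvGone, hc]

theorem pvCnt_nonneg (π : Int → Int → Int) (lamps : List (List Int)) (r : Int) : 0 ≤ pvCnt π lamps r := by
  induction lamps with
  | nil => simp [pvCnt]
  | cons l ls ih => rw [pvCnt_cons]; split <;> omega

theorem pvBuild1_get?_gen (π : Int → Int → Int) (lamps : List (List Int)) :
    ∀ (d : PySem.Dict Int Int) (r : Int),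
    (pvBuild1 π lamps d).get? r =
      if pvCnt π lamps r = 0 then d.get? r else some (d.getD r 0 + pvCnt π lamps r) := by
  induction lamps with
  | nil => intro d r; simp [pvBuild1, pvCnt]
  | cons l ls ih =>
    intro d r
    have hstep : pvBuild1 π (l :: ls) d =
        pvBuild1 π ls (d.insert (π (pvPair l).1 (pvPair l).2) (d.getD (π (pvPair l).1 (pvPair l).2) 0 + 1)) := rfl
    rw [hstep, ih, pvCnt_cons]
    by_cases hk : π (pvPair l).1 (pvPair l).2 = r
    · subst hk
      have hc0 := pvCnt_nonneg π ls (π (pvPair l).1 (pvPair l).2)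
      rw [PySem.Dict.get?_insert, PySem.Dict.getD_insert, if_pos rfl, if_pos rfl, if_pos rfl]
      by_cases h1 : pvCnt π ls (π (pvPair l).1 (pvPair l).2) = 0
      · rw [if_pos h1, if_neg (by omega)]
        rw [Option.some_inj]
        omega
      · rw [if_neg h1, if_neg (by omega)]
        rw [Option.some_inj]
        omega
    · have hr : ¬ (r = π (pvPair l).1 (pvPair l).2) := fun e => hk e.symm
      rw [if_neg hk]
      simp only [zero_add]
      rw [PySem.Dict.get?_insert, PySem.Dict.getD_insert, if_neg hr, if_neg hr]

theorem pvBuild1_get? (π : Int → Int → Int) (lamps : List (List Int)) (r : Int) :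
    (pvBuild1 π lamps PySem.Dict.empty).get? r =
      if pvCnt π lamps r = 0 then none else some (pvCnt π lamps r) := by
  rw [pvBuild1_get?_gen]
  by_cases h : pvCnt π lamps r = 0 <;> simp [h, PySem.Dict.get?_empty, PySem.Dict.getD_empty]

theorem pvDInv_init (π : Int → Int → Int) (lamps : List (List Int)) :
    pvDInv π (pvBuild1 π lamps PySem.Dict.empty) lamps [] := by
  intro r
  constructor
  · intro hnone
    rw [pvBuild1_get?] at hnone
    refine ⟨?_, by simp [pvGone]⟩
    by_cases h : pvCnt π lamps r = 0
    · exact h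
    · rw [if_neg h] at hnone; exact absurd hnone (by simp)
  · intro f hf
    rw [pvBuild1_get?] at hf
    by_cases h : pvCnt π lamps r = 0
    · rw [if_pos h] at hf; exact absurd hf (by simp)
    · rw [if_neg h, Option.some_inj] at hf
      left
      simp only [pvBal, pvGone, List.foldl_nil]
      omega

theorem pvDInv_lit (π : Int → Int → Int) (d : PySem.Dict Int Int) (lamps : List (List Int))
    (removed : List (Int × Int × Int)) (h : pvDInv π d lamps removed) (r : Int) :
    (d.getD r 0 > 0) ↔ (pvBal π lamps removed r > 0) := by
  obtain ⟨h1, h2⟩ := h r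
  cases hr : d.get? r with
  | none =>
    obtain ⟨hc, hg⟩ := h1 hr
    rw [PySem.Dict.getD_eq_get?_getD, hr]
    simp only [pvBal, hc, hg, Option.getD_none]
    omega
  | some f =>
    have hd := h2 f hr
    rw [PySem.Dict.getD_eq_get?_getD, hr]
    simp only [Option.getD_some]
    omega

theorem pvDInv_update (π : Int → Int → Int) (d : PySem.Dict Int Int) (lamps : List (List Int))
    (removed : List (Int × Int × Int)) (x1 y1 t : Int) (ht : 1 ≤ t) (h : pvDInv π d lamps removed) :
    pvDInv π (d.insert (π x1 y1) (d.getD (π x1 y1) 1 - t)) lamps (removed ++ [(x1, y1, t)]) := by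
  intro r
  have hgone := pvGone_append π removed x1 y1 t r
  constructor
  · intro hnone
    rw [PySem.Dict.get?_insert] at hnone
    by_cases hr : r = π x1 y1
    · rw [if_pos hr] at hnone; exact absurd hnone (by simp)
    · rw [if_neg hr] at hnone
      obtain ⟨hc, hg⟩ := (h r).1 hnone
      rw [hgone, if_neg (fun e => hr e.symm)]
      exact ⟨hc, by omega⟩
  · intro f hf
    rw [PySem.Dict.get?_insert] at hf
    by_cases hr : r = π x1 y1
    · rw [if_pos hr, Option.some_inj] at hf
      subst hr
      rw [PySem.Dict.getD_eq_get?_getD] at hf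
      have hg2 : pvGone π (removed ++ [(x1, y1, t)]) (π x1 y1) = pvGone π removed (π x1 y1) + t := by
        rw [pvGone_append]; simp
      simp only [pvBal]
      rw [hg2]
      cases hd : d.get? (π x1 y1) with
      | none =>
        obtain ⟨hc, hg⟩ := (h (π x1 y1)).1 hd
        rw [hd] at hf
        simp only [Option.getD_none] at hf
        right
        omega
      | some g =>
        have hdis := (h (π x1 y1)).2 g hd
        rw [hd] at hf
        simp only [Option.getD_some] at hf
        simp only [pvBal] at hdis
        omega
    · rw [if_neg hr] at hf
      have hdis := (h r).2 f hf
      simp only [pvBal] at hdis ⊢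
      rw [hgone, if_neg (fun e => hr e.symm)]
      omega

theorem pvBuildA_proj (n : Int) (lamps : List (List Int)) :
    ∀ s : pvASt, lamps.foldl (pvBuildStep n) s =
      ⟨pvBuild1 (fun a _ => a) lamps s.d1, pvBuild1 (fun _ b => b) lamps s.d2,
       pvBuild1 (fun a b => a - b) lamps s.d3, pvBuild1 (fun a b => a + b) lamps s.d4,
       pvBuild1 (fun a b => n * a + b) lamps s.d5⟩ := by
  induction lamps with
  | nil => intro s; rfl
  | cons l ls ih =>
    intro s
    rw [List.foldl_cons, ih]
    rfl

theorem pvInv_init (n : Int) (lamps : List (List Int)) :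
    pvInv n lamps (lamps.foldl (pvBuildStep n) ⟨PySem.Dict.empty, PySem.Dict.empty, PySem.Dict.empty, PySem.Dict.empty, PySem.Dict.empty⟩)
      (pvBuild1 (fun a b => n * a + b) lamps PySem.Dict.empty) [] := by
  rw [pvBuildA_proj]
  refine ⟨rfl, ?_, pvDInv_init _ lamps, pvDInv_init _ lamps, pvDInv_init _ lamps, pvDInv_init _ lamps⟩
  intro k v hv
  rw [pvBuild1_get?] at hv
  by_cases h : pvCnt (fun a b => n * a + b) lamps k = 0
  · rw [if_pos h] at hv; exact absurd hv (by simp)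
  · rw [if_neg h, Option.some_inj] at hv
    have := pvCnt_nonneg (fun a b => n * a + b) lamps k
    omega

theorem pvDir_sim (n : Int) (lamps : List (List Int)) (x y : Int) (s : pvASt)
    (act : PySem.Dict Int Int) (removed : List (Int × Int × Int)) (dA : List Int)
    (h : pvInv n lamps s act removed) :
    pvInv n lamps (pvADir n x y s dA)
      ((pvBDir n x y (act, removed) (pvPair dA)).1) ((pvBDir n x y (act, removed) (pvPair dA)).2) := by
  obtain ⟨h5, hval, h1, h2, h3, h4⟩ := h
  by_cases hb : 0 ≤ x + (pvPair dA).1 ∧ x + (pvPair dA).1 < n ∧ 0 ≤ y + (pvPair dA).2 ∧ y + (pvPair dA).2 < n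
  case neg =>
    have hA : pvADir n x y s dA = s := by
      unfold pvADir
      rw [if_neg (by tauto)]
    have hB : pvBDir n x y (act, removed) (pvPair dA) = (act, removed) := by
      unfold pvBDir
      rw [if_neg hb]
    rw [hA, hB]
    exact ⟨h5, hval, h1, h2, h3, h4⟩
  case pos =>
    cases hg : act.get? (n * (x + (pvPair dA).1) + (y + (pvPair dA).2)) with
    | none =>
      have hcont : s.d5.contains (n * (x + (pvPair dA).1) + (y + (pvPair dA).2)) = false := by
        rw [h5]
        exact (PySem.Dict.get?_eq_none_iff_contains act _).1 hg
      have hA : pvADir n x y s dA = s := by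
        unfold pvADir
        rw [if_neg (by simp [hcont])]
      have hB : pvBDir n x y (act, removed) (pvPair dA) = (act, removed) := by
        unfold pvBDir
        rw [if_pos hb]
        simp [PySem.Dict.pop?, hg]
      rw [hA, hB]
      exact ⟨h5, hval, h1, h2, h3, h4⟩
    | some t =>
      have ht : 1 ≤ t := hval _ _ hg
      have hcont : s.d5.contains (n * (x + (pvPair dA).1) + (y + (pvPair dA).2)) = true := by
        rw [h5, PySem.Dict.contains_eq_isSome_get?, hg]
        rfl
      have htimes : s.d5.getD (n * (x + (pvPair dA).1) + (y + (pvPair dA).2)) 0 = t := by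
        rw [h5, PySem.Dict.getD_eq_get?_getD, hg]
        rfl
      have hA : pvADir n x y s dA =
          ⟨s.d1.insert (x + (pvPair dA).1) (s.d1.getD (x + (pvPair dA).1) 1 - t),
           s.d2.insert (y + (pvPair dA).2) (s.d2.getD (y + (pvPair dA).2) 1 - t),
           s.d3.insert ((x + (pvPair dA).1) - (y + (pvPair dA).2)) (s.d3.getD ((x + (pvPair dA).1) - (y + (pvPair dA).2)) 1 - t),
           s.d4.insert ((x + (pvPair dA).1) + (y + (pvPair dA).2)) (s.d4.getD ((x + (pvPair dA).1) + (y + (pvPair dA).2)) 1 - t),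
           s.d5.erase (n * (x + (pvPair dA).1) + (y + (pvPair dA).2))⟩ := by
        unfold pvADir
        rw [if_pos ⟨hb.1, hb.2.1, hb.2.2.1, hb.2.2.2, hcont⟩]
        rw [htimes]
      have hB : pvBDir n x y (act, removed) (pvPair dA) =
          (act.erase (n * (x + (pvPair dA).1) + (y + (pvPair dA).2)),
           removed ++ [(x + (pvPair dA).1, y + (pvPair dA).2, t)]) := by
        unfold pvBDir
        rw [if_pos hb]
        simp [PySem.Dict.pop?, hg]
      rw [hA, hB]
      refine ⟨by rw [h5], ?_, ?_, ?_, ?_, ?_⟩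
      · intro k' v hv
        rw [pv_get?_erase] at hv
        by_cases hk' : k' = n * (x + (pvPair dA).1) + (y + (pvPair dA).2)
        · rw [if_pos hk'] at hv; exact absurd hv (by simp)
        · rw [if_neg hk'] at hv; exact hval _ _ hv
      · exact pvDInv_update (fun a _ => a) s.d1 lamps removed _ _ t ht h1
      · exact pvDInv_update (fun _ b => b) s.d2 lamps removed _ _ t ht h2
      · exact pvDInv_update (fun a b => a - b) s.d3 lamps removed _ _ t ht h3
      · exact pvDInv_update (fun a b => a + b) s.d4 lamps removed _ _ t ht h4

theorem pvDirs_fold_sim (n : Int) (lamps : List (List Int)) (x y : Int) :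
    ∀ (dsA : List (List Int)) (s : pvASt) (act : PySem.Dict Int Int) (removed : List (Int × Int × Int)),
    pvInv n lamps s act removed →
    pvInv n lamps (dsA.foldl (pvADir n x y) s)
      (((dsA.map pvPair).foldl (pvBDir n x y) (act, removed)).1)
      (((dsA.map pvPair).foldl (pvBDir n x y) (act, removed)).2) := by
  intro dsA
  induction dsA with
  | nil => intro s act removed h; exact h
  | cons a as ih =>
    intro s act removed h
    simp only [List.map_cons, List.foldl_cons]
    have hstep := pvDir_sim n lamps x y s act removed a h
    have hres := ih (pvADir n x y s a) ((pvBDir n x y (act, removed) (pvPair a)).1)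
      ((pvBDir n x y (act, removed) (pvPair a)).2) hstep
    exact hres

theorem pvMain (n : Int) (lamps : List (List Int)) (queries : List (List Int)) :
    ∀ (s : pvASt) (act : PySem.Dict Int Int) (removed : List (Int × Int × Int)) (ans : List Int),
    pvInv n lamps s act removed →
    (queries.foldl (pvAQuery n) (s, ans)).2 =
      (queries.foldl (pvBQuery n lamps) (act, removed, ans)).2.2 := by
  induction queries with
  | nil => intro s act removed ans _; rfl
  | cons q qs ih =>
    intro s act removed ans h
    simp only [List.foldl_cons]
    have hlit : (if s.d1.getD (pvPair q).1 0 > 0 ∨ s.d2.getD (pvPair q).2 0 > 0 ∨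
          s.d3.getD ((pvPair q).1 - (pvPair q).2) 0 > 0 ∨ s.d4.getD ((pvPair q).1 + (pvPair q).2) 0 > 0 then (1 : Int) else 0) =
        (if pvBal (fun a _ => a) lamps removed (pvPair q).1 > 0 ∨ pvBal (fun _ b => b) lamps removed (pvPair q).2 > 0 ∨
          pvBal (fun a b => a - b) lamps removed ((pvPair q).1 - (pvPair q).2) > 0 ∨
          pvBal (fun a b => a + b) lamps removed ((pvPair q).1 + (pvPair q).2) > 0 then (1 : Int) else 0) := by
      refine if_congr (or_congr ?_ (or_congr ?_ (or_congr ?_ ?_))) rfl rfl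
      · exact pvDInv_lit _ _ _ _ h.2.2.1 _
      · exact pvDInv_lit _ _ _ _ h.2.2.2.1 _
      · exact pvDInv_lit _ _ _ _ h.2.2.2.2.1 _
      · exact pvDInv_lit _ _ _ _ h.2.2.2.2.2 _
    have hfold := pvDirs_fold_sim n lamps (pvPair q).1 (pvPair q).2 pvDirsA s act removed h
    have hdirs : pvDirsA.map pvPair = pvDirsB := rfl
    rw [hdirs] at hfold
    have := ih (pvDirsA.foldl (pvADir n (pvPair q).1 (pvPair q).2) s)
      ((pvDirsB.foldl (pvBDir n (pvPair q).1 (pvPair q).2) (act, removed)).1)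
      ((pvDirsB.foldl (pvBDir n (pvPair q).1 (pvPair q).2) (act, removed)).2)
      (ans ++ [(if s.d1.getD (pvPair q).1 0 > 0 ∨ s.d2.getD (pvPair q).2 0 > 0 ∨
          s.d3.getD ((pvPair q).1 - (pvPair q).2) 0 > 0 ∨ s.d4.getD ((pvPair q).1 + (pvPair q).2) 0 > 0 then (1 : Int) else 0)])
      hfold
    simp only [pvAQuery, pvBQuery]
    rw [← hlit]
    exact this

-- ===== VERDICT (by name: the statement is the Claim_ definition above) =====
theorem gridIllumination_spec : Claim_equal_gridIllumination := by
  intro n lamps queries _ _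
  unfold Spec_gridIllumination gridIllumination gridIllumination_alt
  have hb : lamps.foldl
      (fun a l => a.insert (n * (pvPair l).1 + (pvPair l).2) (a.getD (n * (pvPair l).1 + (pvPair l).2) 0 + 1))
      PySem.Dict.empty = pvBuild1 (fun a b => n * a + b) lamps PySem.Dict.empty := rfl
  rw [hb]
  exact pvMain n lamps queries _ _ [] [] (pvInv_init n lamps)
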